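-- pv_equiv track=rewrite | github.com/Andrem19/ORC_1 | app/planner_stream.py | _looks_like_numbered_step
-- ===== SOURCE A (Python) =====
-- def _looks_like_numbered_step(line: str) -> bool:
--     if not line:
--         return False
--     digits = []
--     for ch in line:
--         if ch.isdigit():
--             digits.append(ch)
--             continue
--         break
--     if not digits:
--         return False
--     return line[len(digits):].startswith(". ")
-- ===== SOURCE B (Python) =====
-- def _looks_like_numbered_step(line: str) -> bool:
--     idx = line.find(". ")
--     if idx <= 0:
--         return False
--     return line[:idx].isdigit()
-- ===== Notes on version B (the rewrite author's own statement) =====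
-- stated objective: simpler
-- what changed: B locates the dot-space separator first with str.find and tests the whole prefix before it with str.isdigit, replacing A's explicit digit-accumulating loop, slice and startswith check; equivalent because the first such separator can only sit at the end of the leading digit run.
import Mathlib
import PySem

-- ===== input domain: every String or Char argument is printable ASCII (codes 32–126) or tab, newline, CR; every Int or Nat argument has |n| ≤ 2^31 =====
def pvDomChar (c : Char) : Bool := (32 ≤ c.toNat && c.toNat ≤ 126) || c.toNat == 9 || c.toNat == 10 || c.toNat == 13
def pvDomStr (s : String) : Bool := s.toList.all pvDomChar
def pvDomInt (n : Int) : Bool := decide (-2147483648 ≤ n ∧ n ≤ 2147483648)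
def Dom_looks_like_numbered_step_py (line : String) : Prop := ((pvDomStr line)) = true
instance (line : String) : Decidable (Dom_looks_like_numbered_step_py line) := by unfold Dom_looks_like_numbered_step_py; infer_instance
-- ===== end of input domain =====

-- B locates the '. ' separator first (str.find) and tests the prefix with str.isdigit,
-- replacing A's digit-accumulating loop + slice + startswith; simpler, return value proved equal.

-- ===== PORT A =====
-- the 'for ch in line: … break' loop accumulating the leading digit characters
def pvCollectDigits (acc : List Char) : List Char → List Char
  | [] => acc
  | c :: rest =>
    if PySem.Chars.isdigit c then pvCollectDigits (acc ++ [c]) rest else acc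

def looks_like_numbered_step_py (line : String) : Bool :=
  if line.toList.isEmpty then false
  else
    let digits := pvCollectDigits [] line.toList
    if digits.isEmpty then false
    else PySem.Chars.startswith
          (PySem.Chars.slice line.toList (some (digits.length : Int)) none) ['.', ' ']

-- ===== PORT B =====
def looks_like_numbered_step_py_alt (line : String) : Bool :=
  let idx := PySem.Str.find line ". "
  if idx ≤ 0 then false
  else PySem.Chars.strIsdigit (PySem.Chars.slice line.toList none (some idx))

-- ===== PRECONDITION & SPEC =====
def Spec_looks_like_numbered_step_py (line : String) (out : Bool) : Prop := out = looks_like_numbered_step_py_alt line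
instance (line : String) (out : Bool) : Decidable (Spec_looks_like_numbered_step_py line out) := by unfold Spec_looks_like_numbered_step_py; infer_instance

-- ===== CLAIM (what is proved, stated in full; the proofs are below) =====
def Claim_equal_looks_like_numbered_step_py : Prop := ∀ (line : String), Dom_looks_like_numbered_step_py line → Spec_looks_like_numbered_step_py line (looks_like_numbered_step_py line)

-- ===== LEMMAS AND PROOFS =====

-- A's accumulating loop is List.takeWhile
theorem pvCollectDigits_eq (cs : List Char) : ∀ acc,
    pvCollectDigits acc cs = acc ++ cs.takeWhile PySem.Chars.isdigit := by
  induction cs with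
  | nil => intro acc; simp [pvCollectDigits]
  | cons c rest ih =>
    intro acc
    by_cases h : PySem.Chars.isdigit c
    · simp [pvCollectDigits, h, ih]
    · simp [pvCollectDigits, h]

-- every character strictly inside the leading digit run is a digit
theorem pv_digit_prefix (cs : List Char) (i : Nat)
    (hd : i < (cs.takeWhile PySem.Chars.isdigit).length) (hl : i < cs.length) :
    PySem.Chars.isdigit (cs[i]'hl) = true := by
  have heq := (List.takeWhile_prefix (l := cs) PySem.Chars.isdigit).getElem (i := i) hd
  exact List.mem_takeWhile_imp (heq ▸ List.getElem_mem hd)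

-- the character right after the leading digit run is not a digit
theorem pv_digit_boundary : ∀ (cs : List Char)
    (h : (cs.takeWhile PySem.Chars.isdigit).length < cs.length),
    PySem.Chars.isdigit (cs[(cs.takeWhile PySem.Chars.isdigit).length]'h) = false := by
  intro cs
  induction cs with
  | nil => intro h; simp at h
  | cons c rest ih =>
    intro h
    by_cases hc : PySem.Chars.isdigit c
    · simp only [List.takeWhile_cons, hc, if_true, List.length_cons] at h ⊢
      simpa using ih (by omega)
    · simp [hc]

-- an occurrence of '. ' at index i pins down cs[i] and forces i + 2 ≤ |cs|
theorem pv_sep_at (cs : List Char) (i : Nat) (h : ['.', ' '] <+: cs.drop i) :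
    i + 2 ≤ cs.length ∧ cs[i]? = some '.' := by
  obtain ⟨t, ht⟩ := h
  constructor
  · have h2 : (['.', ' '] ++ t).length = (cs.drop i).length := by rw [ht]
    simp only [List.length_append, List.length_cons, List.length_drop] at h2
    omega
  · have h0 : (cs.drop i)[0]? = some '.' := by rw [← ht]; rfl
    rw [List.getElem?_drop] at h0
    simpa using h0

theorem pv_main (cs : List Char) :
    (if cs.isEmpty then false
     else if (pvCollectDigits [] cs).isEmpty then false
     else PySem.Chars.startswith
            (PySem.Chars.slice cs (some ((pvCollectDigits [] cs).length : Int)) none) ['.', ' '])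
    = (if PySem.Chars.find cs ['.', ' '] ≤ 0 then false
       else PySem.Chars.strIsdigit
              (PySem.Chars.slice cs none (some (PySem.Chars.find cs ['.', ' '])))) := by
  have hcol := pvCollectDigits_eq cs []
  simp only [List.nil_append] at hcol
  simp only [PySem.Chars.slice_eq_listSlice]
  by_cases hf : PySem.Chars.find cs ['.', ' '] ≤ 0
  · -- B is false; show A is false too
    simp only [hf, if_true]
    by_cases h1 : cs.isEmpty
    · simp [h1]
    · simp only [h1, Bool.false_eq_true, if_false]
      by_cases h2 : (pvCollectDigits [] cs).isEmpty
      · simp [h2]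
      · simp only [h2, Bool.false_eq_true, if_false]
        rw [PySem.List.slice_from cs (Int.natCast_nonneg _)]
        have hd1 : 1 ≤ (cs.takeWhile PySem.Chars.isdigit).length := by
          rw [hcol, List.isEmpty_iff] at h2
          have := List.length_pos_of_ne_nil h2
          omega
        rw [Bool.eq_false_iff, Ne, PySem.Chars.startswith_iff]
        intro hpre
        rw [hcol] at hpre
        simp only [Int.toNat_natCast] at hpre
        have hnn : 0 ≤ PySem.Chars.find cs ['.', ' '] :=
          (PySem.Chars.find_nonneg_iff cs _).mpr
            ((PySem.Chars.isIn_iff_infix _ cs).mp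
              ((PySem.Chars.exists_prefix_drop_iff_isIn _ cs).mp
                ⟨(cs.takeWhile PySem.Chars.isdigit).length, hpre⟩))
        have hzero : PySem.Chars.find cs ['.', ' '] = 0 := le_antisymm hf hnn
        obtain ⟨hp0, -⟩ := PySem.Chars.find_spec hnn
        rw [hzero] at hp0
        obtain ⟨hlen0, hdot0⟩ := pv_sep_at cs 0 (by simpa using hp0)
        have h0lt : 0 < cs.length := by omega
        have hdig0 : PySem.Chars.isdigit (cs[0]'h0lt) = true :=
          pv_digit_prefix cs 0 (by omega) h0lt
        rw [List.getElem?_eq_getElem h0lt, Option.some_inj] at hdot0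
        have : PySem.Chars.isdigit '.' = true := by rw [← hdot0]; exact hdig0
        exact absurd this (by decide)
  · -- '. ' occurs, first at a positive index k
    simp only [hf, if_false]
    have hpos : 0 < PySem.Chars.find cs ['.', ' '] := by omega
    obtain ⟨hocc, hmin⟩ := PySem.Chars.find_spec hpos.le
    obtain ⟨hklen, hkdot⟩ := pv_sep_at cs _ hocc
    rw [PySem.List.slice_to cs hpos.le]
    set k := (PySem.Chars.find cs ['.', ' ']).toNat with hkdef
    have hk1 : 1 ≤ k := by omega
    have hklt : k < cs.length := by omega
    have hkdot' : cs[k]'hklt = '.' := by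
      rwa [List.getElem?_eq_getElem hklt, Option.some_inj] at hkdot
    by_cases hall : (cs.take k).all PySem.Chars.isdigit = true
    · -- all digits before the separator: both sides are true
      have hall' : ∀ i (hi : i < k), PySem.Chars.isdigit (cs[i]'(by omega)) = true := by
        intro i hi
        have hm : cs[i]'(by omega) ∈ cs.take k := by
          rw [List.mem_iff_getElem]
          exact ⟨i, by rw [List.length_take]; omega, by rw [List.getElem_take]⟩
        exact List.all_eq_true.mp hall _ hm
      have hdk : (cs.takeWhile PySem.Chars.isdigit).length = k := by
        have hle1 : (cs.takeWhile PySem.Chars.isdigit).length ≤ k := by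
          by_contra hgt
          have hdig : PySem.Chars.isdigit (cs[k]'hklt) = true :=
            pv_digit_prefix cs k (by omega) hklt
          have : PySem.Chars.isdigit '.' = true := by rw [← hkdot']; exact hdig
          exact absurd this (by decide)
        have hle2 : k ≤ (cs.takeWhile PySem.Chars.isdigit).length := by
          by_contra hgt
          have hb := pv_digit_boundary cs (by omega)
          exact absurd ((hall' _ (by omega)).symm.trans hb) (by decide)
        omega
      have hne : cs.isEmpty = false := by
        rw [List.isEmpty_eq_false_iff]; intro h; rw [h] at hklt; simp at hklt
      have hne2 : (pvCollectDigits [] cs).isEmpty = false := by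
        rw [hcol, List.isEmpty_eq_false_iff]
        intro h
        rw [h] at hdk
        simp at hdk
        omega
      rw [hne, hne2]
      simp only [Bool.false_eq_true, if_false]
      rw [PySem.List.slice_from cs (Int.natCast_nonneg _),
        hcol, Int.toNat_natCast, hdk]
      rw [(PySem.Chars.startswith_iff _ _).mpr hocc]
      have hBtrue : PySem.Chars.strIsdigit (cs.take k) = true := by
        unfold PySem.Chars.strIsdigit
        have hne3 : (cs.take k).isEmpty = false := by
          rw [List.isEmpty_eq_false_iff, Ne, List.take_eq_nil_iff]
          push Not
          refine ⟨by omega, ?_⟩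
          intro hcs
          rw [hcs] at hklt
          simp at hklt
        rw [hne3, hall]
        rfl
      rw [hBtrue]
    · -- a non-digit before the separator: both sides are false
      rw [Bool.not_eq_true] at hall
      have hB : PySem.Chars.strIsdigit (cs.take k) = false := by
        unfold PySem.Chars.strIsdigit
        rw [Bool.and_eq_false_iff]
        right
        exact hall
      rw [hB]
      obtain ⟨x, hxm, hxp⟩ := List.all_eq_false.mp hall
      obtain ⟨i, hil, hxi⟩ := List.mem_iff_getElem.mp hxm
      have hik : i < k := by rw [List.length_take] at hil; omega
      have hnd : PySem.Chars.isdigit (cs[i]'(by omega)) = false := by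
        rw [← List.getElem_take (h := hil), hxi]
        simpa using hxp
      have hdi : (cs.takeWhile PySem.Chars.isdigit).length ≤ i := by
        by_contra hgt
        exact absurd ((pv_digit_prefix cs i (by omega) (by omega)).symm.trans hnd) (by decide)
      by_cases h1 : cs.isEmpty
      · simp [h1]
      · simp only [h1, Bool.false_eq_true, if_false]
        by_cases h2 : (pvCollectDigits [] cs).isEmpty
        · simp [h2]
        · simp only [h2, Bool.false_eq_true, if_false]
          rw [PySem.List.slice_from cs (Int.natCast_nonneg _),
            hcol, Int.toNat_natCast]
          rw [Bool.eq_false_iff, Ne, PySem.Chars.startswith_iff]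
          exact hmin _ (by omega)

-- ===== VERDICT (by name: the statement is the Claim_ definition above) =====
theorem looks_like_numbered_step_py_spec : Claim_equal_looks_like_numbered_step_py := by
  intro line _
  unfold Spec_looks_like_numbered_step_py looks_like_numbered_step_py looks_like_numbered_step_py_alt
  have hfind : PySem.Str.find line ". " = PySem.Chars.find line.toList ['.', ' '] := by
    simp [PySem.Str.find]
  rw [hfind]
  exact pv_main line.toList
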